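-- pv_equiv track=rewrite | github.com/cseproject-team7/fall-cse-senior-project | azure_ml_deployment/score.py | detect_pattern_heuristic
-- ===== SOURCE A (Python) =====
-- from typing import List, Dict, Any
--
-- def detect_pattern_heuristic(apps: List[str]) -> str:
--     """Detect pattern from app list using heuristics"""
--     apps_set = set([app.lower() for app in apps])
--     apps_str = ' '.join([app.lower() for app in apps])
--
--     # Pattern detection rules
--     admin_apps = ['oasis', 'degreeworks', 'myusf', 'archivum', 'navigate', 'schedule planner']
--     career_apps = ['handshake', 'linkedin', 'indeed', 'glassdoor']
--     coding_apps = ['github', 'visual studio', 'jupyter', 'colab', 'matlab', 'replit', 'codepen']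
--     research_apps = ['jstor', 'ieee', 'google scholar', 'pubmed', 'arxiv', 'library']
--     social_apps = ['teams', 'yammer', 'slack', 'discord']
--
--     has_admin = any(any(admin_app in app.lower() for admin_app in admin_apps) for app in apps)
--     has_career = any(any(career_app in app.lower() for career_app in career_apps) for app in apps)
--     has_coding = any(any(coding_app in app.lower() for coding_app in coding_apps) for app in apps)
--     has_research = any(any(research_app in app.lower() for research_app in research_apps) for app in apps)
--     has_social = any(any(social_app in app.lower() for social_app in social_apps) for app in apps)
--     has_canvas = any('canvas' in app.lower() for app in apps)
--
--     if has_admin: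
--         return 'ADMIN'
--     elif has_career:
--         return 'CAREER'
--     elif 'club' in apps_str or 'organization' in apps_str:
--         return 'CLUBS'
--     elif has_coding:
--         return 'CODING'
--     elif has_research:
--         return 'RESEARCH'
--     elif has_canvas and any(exam_app in apps_str for exam_app in ['onenote', 'pdf', 'word']):
--         return 'EXAM'
--     elif has_social:
--         return 'SOCIAL'
--     else:
--         return 'COURSEWORK'
-- ===== SOURCE B (Python) =====
-- CATEGORIES = [
--     ('ADMIN',    ['oasis', 'degreeworks', 'myusf', 'archivum', 'navigate', 'schedule planner']),
--     ('CAREER',   ['handshake', 'linkedin', 'indeed', 'glassdoor']),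
--     ('CODING',   ['github', 'visual studio', 'jupyter', 'colab', 'matlab', 'replit', 'codepen']),
--     ('RESEARCH', ['jstor', 'ieee', 'google scholar', 'pubmed', 'arxiv', 'library']),
--     ('SOCIAL',   ['teams', 'yammer', 'slack', 'discord']),
-- ]
-- # numeric priority of each label in the overall ranking
-- PRIORITY = {'ADMIN': 0, 'CAREER': 1, 'CLUBS': 2, 'CODING': 3,
--             'RESEARCH': 4, 'EXAM': 5, 'SOCIAL': 6}
-- LABELS = ['ADMIN', 'CAREER', 'CLUBS', 'CODING', 'RESEARCH', 'EXAM', 'SOCIAL', 'COURSEWORK']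
--
--
-- def _score(app):
--     """Priority of the first per-app category this app triggers, 8 if none."""
--     for label, kws in CATEGORIES:
--         if any(kw in app for kw in kws):
--             return PRIORITY[label]
--     return 8
--
--
-- def detect_pattern_heuristic(apps):
--     """Detect pattern from app list using heuristics (min-priority scoring)."""
--     lowered = [app.lower() for app in apps]
--     apps_str = ' '.join(lowered)
--     # one pass over the apps: best per-app priority and the canvas flag
--     best = 8
--     has_canvas = False
--     for app in lowered:
--         best = min(best, _score(app))
--         has_canvas = has_canvas or 'canvas' in app
--     # joined-string rules contribute their own priorities
--     if 'club' in apps_str or 'organization' in apps_str: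
--         best = min(best, PRIORITY['CLUBS'])
--     if has_canvas and any(kw in apps_str for kw in ['onenote', 'pdf', 'word']):
--         best = min(best, PRIORITY['EXAM'])
--     return LABELS[min(best, 7)]
-- ===== Notes on version B (the rewrite author's own statement) =====
-- stated objective: alternative
-- what changed: Instead of computing six category booleans and walking an if/elif chain, B scores each app once with its best (lowest) category priority in a single pass, folds the minimum together with a canvas flag, merges the joined-string CLUBS/EXAM rules as extra priority candidates, and returns the label at the minimal priority from a table.
import Mathlib
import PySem

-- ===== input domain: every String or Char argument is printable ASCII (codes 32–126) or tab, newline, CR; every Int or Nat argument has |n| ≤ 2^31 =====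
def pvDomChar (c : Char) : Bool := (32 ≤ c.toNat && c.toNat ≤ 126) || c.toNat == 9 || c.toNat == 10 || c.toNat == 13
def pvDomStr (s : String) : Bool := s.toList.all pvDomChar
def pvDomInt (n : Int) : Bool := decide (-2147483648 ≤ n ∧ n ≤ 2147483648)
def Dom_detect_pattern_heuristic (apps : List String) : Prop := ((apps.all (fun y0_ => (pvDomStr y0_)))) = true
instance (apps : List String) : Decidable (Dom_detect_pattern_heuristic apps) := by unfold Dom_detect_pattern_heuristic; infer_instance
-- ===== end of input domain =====

-- B replaces the six boolean flags + if/elif chain by min-priority scoring: each app is scored once with its best category priority, the list is folded to the minimum, the joined-string rules add priority candidates, and a label table maps the minimum back (alternative decomposition, similar cost).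


-- ===== PORT A =====
def detect_pattern_heuristic (apps : List String) : String :=
  let _apps_set := PySem.Set.ofList (apps.map (fun app => PySem.Str.lower app))
  let apps_str := PySem.Str.join " " (apps.map (fun app => PySem.Str.lower app))
  let admin_apps := ["oasis", "degreeworks", "myusf", "archivum", "navigate", "schedule planner"]
  let career_apps := ["handshake", "linkedin", "indeed", "glassdoor"]
  let coding_apps := ["github", "visual studio", "jupyter", "colab", "matlab", "replit", "codepen"]
  let research_apps := ["jstor", "ieee", "google scholar", "pubmed", "arxiv", "library"]
  let social_apps := ["teams", "yammer", "slack", "discord"]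
  let has_admin := apps.any (fun app => admin_apps.any (fun k => PySem.Str.isIn k (PySem.Str.lower app)))
  let has_career := apps.any (fun app => career_apps.any (fun k => PySem.Str.isIn k (PySem.Str.lower app)))
  let has_coding := apps.any (fun app => coding_apps.any (fun k => PySem.Str.isIn k (PySem.Str.lower app)))
  let has_research := apps.any (fun app => research_apps.any (fun k => PySem.Str.isIn k (PySem.Str.lower app)))
  let has_social := apps.any (fun app => social_apps.any (fun k => PySem.Str.isIn k (PySem.Str.lower app)))
  let has_canvas := apps.any (fun app => PySem.Str.isIn "canvas" (PySem.Str.lower app))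
  if has_admin then "ADMIN"
  else if has_career then "CAREER"
  else if PySem.Str.isIn "club" apps_str || PySem.Str.isIn "organization" apps_str then "CLUBS"
  else if has_coding then "CODING"
  else if has_research then "RESEARCH"
  else if has_canvas && ["onenote", "pdf", "word"].any (fun k => PySem.Str.isIn k apps_str) then "EXAM"
  else if has_social then "SOCIAL"
  else "COURSEWORK"

-- ===== PORT B =====
-- the CATEGORIES table: (priority from the PRIORITY dict, keyword list)
def pvCategories : List (Nat × List String) :=
  [(0, ["oasis", "degreeworks", "myusf", "archivum", "navigate", "schedule planner"]),
   (1, ["handshake", "linkedin", "indeed", "glassdoor"]),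
   (3, ["github", "visual studio", "jupyter", "colab", "matlab", "replit", "codepen"]),
   (4, ["jstor", "ieee", "google scholar", "pubmed", "arxiv", "library"]),
   (6, ["teams", "yammer", "slack", "discord"])]

-- _score: 'for label, kws in CATEGORIES: if any(kw in app for kw in kws): return PRIORITY[label]; return 8'
def pvScoreLoop (app : String) : List (Nat × List String) → Nat
  | [] => 8
  | (p, kws) :: rest => if kws.any (fun kw => PySem.Str.isIn kw app) then p else pvScoreLoop app rest

def pvScore (app : String) : Nat := pvScoreLoop app pvCategories

def pvLabels : List String :=
  ["ADMIN", "CAREER", "CLUBS", "CODING", "RESEARCH", "EXAM", "SOCIAL", "COURSEWORK"]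

def detect_pattern_heuristic_alt (apps : List String) : String :=
  let lowered := apps.map (fun app => PySem.Str.lower app)
  let apps_str := PySem.Str.join " " lowered
  -- one pass: best per-app priority and the canvas flag
  let st := lowered.foldl
    (fun (st : Nat × Bool) app => (min st.1 (pvScore app), st.2 || PySem.Str.isIn "canvas" app))
    (8, false)
  let best1 := if PySem.Str.isIn "club" apps_str || PySem.Str.isIn "organization" apps_str
               then min st.1 2 else st.1
  let best2 := if st.2 && ["onenote", "pdf", "word"].any (fun kw => PySem.Str.isIn kw apps_str)
               then min best1 5 else best1
  pvLabels.getD (min best2 7) ""   -- LABELS[min(best, 7)]: index always < 8, default never used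

-- ===== PRECONDITION & SPEC =====
def Spec_detect_pattern_heuristic (apps : List String) (out : String) : Prop := out = detect_pattern_heuristic_alt apps
instance (apps : List String) (out : String) : Decidable (Spec_detect_pattern_heuristic apps out) := by unfold Spec_detect_pattern_heuristic; infer_instance

-- ===== CLAIM (what is proved, stated in full; the proofs are below) =====
def Claim_equal_detect_pattern_heuristic : Prop := ∀ (apps : List String), Dom_detect_pattern_heuristic apps → Spec_detect_pattern_heuristic apps (detect_pattern_heuristic apps)

-- ===== LEMMAS AND PROOFS =====

-- priority chain over the five per-app category flags (value of pvScore as a function of the hit flags)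
def pvChain (a c cod res soc : Bool) : Nat :=
  if a then 0 else if c then 1 else if cod then 3 else if res then 4 else if soc then 6 else 8

theorem pvChain_min : ∀ a c cod res soc a' c' cod' res' soc' : Bool,
    min (pvChain a c cod res soc) (pvChain a' c' cod' res' soc')
      = pvChain (a || a') (c || c') (cod || cod') (res || res') (soc || soc') := by decide

def pvHit (kws : List String) (app : String) : Bool := kws.any (fun kw => PySem.Str.isIn kw app)

def pvAdmin : List String := ["oasis", "degreeworks", "myusf", "archivum", "navigate", "schedule planner"]
def pvCareer : List String := ["handshake", "linkedin", "indeed", "glassdoor"]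
def pvCoding : List String := ["github", "visual studio", "jupyter", "colab", "matlab", "replit", "codepen"]
def pvResearch : List String := ["jstor", "ieee", "google scholar", "pubmed", "arxiv", "library"]
def pvSocial : List String := ["teams", "yammer", "slack", "discord"]

theorem pvScore_eq (app : String) :
    pvScore app = pvChain (pvHit pvAdmin app) (pvHit pvCareer app) (pvHit pvCoding app)
      (pvHit pvResearch app) (pvHit pvSocial app) := by
  simp [pvScore, pvCategories, pvScoreLoop, pvChain, pvHit,
        pvAdmin, pvCareer, pvCoding, pvResearch, pvSocial]

def pvScoreMinAux (m : Nat) (l : List String) : Nat := l.foldl (fun r a => min r (pvScore a)) m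

theorem pvFold (l : List String) : ∀ (m : Nat) (c : Bool),
    l.foldl (fun (st : Nat × Bool) app => (min st.1 (pvScore app), st.2 || PySem.Str.isIn "canvas" app)) (m, c)
      = (pvScoreMinAux m l, c || l.any (fun app => PySem.Str.isIn "canvas" app)) := by
  induction l with
  | nil => intro m c; simp [pvScoreMinAux]
  | cons x l ih =>
      intro m c
      simp only [List.foldl_cons, List.any_cons, ih, pvScoreMinAux, Bool.or_assoc]

theorem pvScoreMinAux_eq (l : List String) : ∀ m : Nat, m ≤ 8 →
    pvScoreMinAux m l = min m (pvChain (l.any (pvHit pvAdmin)) (l.any (pvHit pvCareer)) (l.any (pvHit pvCoding))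
      (l.any (pvHit pvResearch)) (l.any (pvHit pvSocial))) := by
  induction l with
  | nil => intro m hm; simp [pvScoreMinAux, pvChain, Nat.min_eq_left hm]
  | cons x l ih =>
      intro m hm
      show pvScoreMinAux (min m (pvScore x)) l = _
      rw [ih _ (le_trans (Nat.min_le_left _ _) hm), Nat.min_assoc, pvScore_eq, pvChain_min]
      simp [List.any_cons]

theorem pvMerge : ∀ (a c cl cod res cv ex soc : Bool),
    (if a then "ADMIN"
     else if c then "CAREER"
     else if cl then "CLUBS"
     else if cod then "CODING"
     else if res then "RESEARCH"
     else if cv && ex then "EXAM"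
     else if soc then "SOCIAL"
     else "COURSEWORK")
    = pvLabels.getD
        (min (if cv && ex then min (if cl then min (pvChain a c cod res soc) 2
                                    else pvChain a c cod res soc) 5
              else if cl then min (pvChain a c cod res soc) 2
              else pvChain a c cod res soc) 7) "" := by decide

theorem pvMin8 : ∀ a c cod res soc : Bool, min 8 (pvChain a c cod res soc) = pvChain a c cod res soc := by decide

-- ===== VERDICT (by name: the statement is the Claim_ definition above) =====
theorem detect_pattern_heuristic_spec : Claim_equal_detect_pattern_heuristic := by
  intro apps _
  show detect_pattern_heuristic apps = detect_pattern_heuristic_alt apps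
  simp only [detect_pattern_heuristic, detect_pattern_heuristic_alt]
  rw [pvFold, pvScoreMinAux_eq _ _ (by norm_num), pvMin8]
  simp only [Bool.false_or, List.any_map, Function.comp_def, pvHit,
             pvAdmin, pvCareer, pvCoding, pvResearch, pvSocial]
  rw [pvMerge]
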